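-- pv_equiv track=rewrite | github.com/AmoghSrivastav007/PythonCode | Pract.py | solution
-- ===== SOURCE A (Python) =====
-- MOD = 10**9 + 7
--
-- def solution(m: int, n: int) -> int:
--     # Can't have more inversions than all pairs (reverse sorted)
--     max_inv = m * (m - 1) // 2
--     if n > max_inv:
--         return 0
--
--     # dp[j] = number of permutations of {1, ..., i} with exactly j inversions
--     # We only need the current row; build it from the previous one each time
--     dp = [0] * (n + 1)
--     dp[0] = 1  # one permutation of 0 elements, 0 inversions
--
--     for i in range(1, m + 1):
--         new_dp = [0] * (n + 1)
--         # When we add the number i, we can stick it in any of i positions.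
--         # Putting it so that k elements are to its right adds k inversions.
--         # So new_dp[j] = sum of old dp[j], dp[j-1], ..., dp[j - (i-1)] (with 0 for negative indices).
--         # That's a sliding window of length i over the previous row.
--         window_sum = 0
--         for j in range(n + 1):
--             window_sum += dp[j]
--             if j >= i:
--                 window_sum -= dp[j - i]
--             new_dp[j] = window_sum % MOD
--         dp = new_dp
--
--     return dp[n] % MOD
-- ===== SOURCE B (Python) =====
-- MOD = 10**9 + 7
--
-- def solution(m: int, n: int) -> int:
--     max_inv = m * (m - 1) // 2
--     if n > max_inv:
--         return 0
--     # dp = coefficients (up to degree n) of prod_{i=1}^{m} (1 + q + ... + q^(i-1))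
--     dp = [1] + [0] * n
--     for i in range(1, m + 1):
--         dp = [sum(dp[j - k] for k in range(min(i - 1, j) + 1)) % MOD
--               for j in range(n + 1)]
--     return dp[n] % MOD
-- ===== Notes on version B (the rewrite author's own statement) =====
-- stated objective: alternative
-- what changed: Replaces A's single-pass sliding-window row update (running window_sum maintained across j) by an explicit nested-loop truncated polynomial convolution: new dp[j] is recomputed as the sum of dp[j-k] for k in 0..min(i-1,j).
import Mathlib
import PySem

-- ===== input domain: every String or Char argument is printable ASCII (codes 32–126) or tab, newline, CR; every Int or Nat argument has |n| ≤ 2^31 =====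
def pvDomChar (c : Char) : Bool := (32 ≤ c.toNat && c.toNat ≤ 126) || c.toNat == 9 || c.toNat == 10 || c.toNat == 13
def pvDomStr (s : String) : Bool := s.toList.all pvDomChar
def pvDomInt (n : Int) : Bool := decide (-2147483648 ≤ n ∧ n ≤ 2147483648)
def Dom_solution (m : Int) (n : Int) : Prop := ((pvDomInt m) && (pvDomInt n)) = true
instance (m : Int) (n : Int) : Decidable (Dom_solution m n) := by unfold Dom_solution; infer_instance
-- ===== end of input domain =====

-- B replaces A's single-pass sliding-window row update by an explicit nested-loop
-- convolution (truncated polynomial product); objective: alternative algorithm, same cost class.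

-- ===== PORT A =====
def pvMOD : Int := 1000000007

-- one row update of A: sliding window_sum over the previous row, appending new_dp entries in order
def rowA (i : Nat) (dp : List Int) (len : Nat) : List Int :=
  ((List.range len).foldl (fun (st : Int × List Int) j =>
      let ws := st.1 + dp.getD j 0
      let ws := if i ≤ j then ws - dp.getD (j - i) 0 else ws
      (ws, st.2 ++ [PySem.Int.mod ws pvMOD])) ((0 : Int), ([] : List Int))).2

def solution (m : Int) (n : Int) : Int :=
  let maxInv := PySem.Int.floordiv (m * (m - 1)) 2
  if n > maxInv then 0
  else
    let len := (n + 1).toNat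
    let dp0 := (List.replicate len (0 : Int)).set 0 1
    let dp := (List.range' 1 m.toNat).foldl (fun dp i => rowA i dp len) dp0
    PySem.Int.mod (dp.getD n.toNat 0) pvMOD

-- ===== PORT B =====
-- one row update of B: new dp[j] = sum of dp[j-k] for k in 0..min(i-1,j), an explicit inner loop
def rowB (i : Nat) (dp : List Int) (len : Nat) : List Int :=
  (List.range len).map (fun j =>
    PySem.Int.mod (((List.range (min (i - 1) j + 1)).map (fun k => dp.getD (j - k) 0)).sum) pvMOD)

def solution_alt (m : Int) (n : Int) : Int :=
  let maxInv := PySem.Int.floordiv (m * (m - 1)) 2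
  if n > maxInv then 0
  else
    let dp0 := 1 :: List.replicate n.toNat (0 : Int)
    let dp := (List.range' 1 m.toNat).foldl (fun dp i => rowB i dp (n + 1).toNat) dp0
    PySem.Int.mod (dp.getD n.toNat 0) pvMOD

-- ===== PRECONDITION & SPEC =====
-- Pre_ excludes n < 0, on which A raises IndexError (dp[0] = 1 on an empty/negative-length list).
def Pre_solution (m : Int) (n : Int) : Prop := 0 ≤ n
instance (m : Int) (n : Int) : Decidable (Pre_solution m n) := by unfold Pre_solution; infer_instance
def pvWitness_solution : Int × Int := (4, 3)

def Spec_solution (m : Int) (n : Int) (out : Int) : Prop := out = solution_alt m n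
instance (m : Int) (n : Int) (out : Int) : Decidable (Spec_solution m n out) := by unfold Spec_solution; infer_instance

-- ===== CLAIM (what is proved, stated in full; the proofs are below) =====
def Claim_equal_solution : Prop := ∀ (m : Int) (n : Int), Dom_solution m n → Pre_solution m n → Spec_solution m n (solution m n)

-- ===== LEMMAS AND PROOFS =====

-- invariant of A's inner loop: the window sum is the sum of dp over Ico (J-i) J,
-- and the accumulated list is new_dp on indices < J
lemma foldA_inv (i : Nat) (dp : List Int) (J : Nat) :
    (List.range J).foldl (fun (st : Int × List Int) j =>
      let ws := st.1 + dp.getD j 0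
      let ws := if i ≤ j then ws - dp.getD (j - i) 0 else ws
      (ws, st.2 ++ [PySem.Int.mod ws pvMOD])) ((0 : Int), ([] : List Int)) =
    (∑ t ∈ Finset.Ico (J - i) J, dp.getD t 0,
     (List.range J).map (fun j => PySem.Int.mod (∑ t ∈ Finset.Ico (j + 1 - i) (j + 1), dp.getD t 0) pvMOD)) := by
  induction J with
  | zero => simp
  | succ J ih =>
    rw [List.range_succ, List.foldl_append, ih]
    simp only [List.foldl_cons, List.foldl_nil, List.map_append, List.map_cons, List.map_nil]
    have hsum : (if i ≤ J then
          (∑ t ∈ Finset.Ico (J - i) J, dp.getD t 0) + dp.getD J 0 - dp.getD (J - i) 0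
        else (∑ t ∈ Finset.Ico (J - i) J, dp.getD t 0) + dp.getD J 0) =
        ∑ t ∈ Finset.Ico (J + 1 - i) (J + 1), dp.getD t 0 := by
      split_ifs with h
      · have h1 : (∑ t ∈ Finset.Ico (J - i) J, dp.getD t 0) + dp.getD J 0 =
            ∑ t ∈ Finset.Ico (J - i) (J + 1), dp.getD t 0 :=
          (Finset.sum_Ico_succ_top (by omega) _).symm
        have h2 : ∑ t ∈ Finset.Ico (J - i) (J + 1), dp.getD t 0 =
            dp.getD (J - i) 0 + ∑ t ∈ Finset.Ico (J - i + 1) (J + 1), dp.getD t 0 :=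
          Finset.sum_eq_sum_Ico_succ_bot (by omega) _
        have h3 : J + 1 - i = J - i + 1 := by omega
        rw [h1, h2, h3]; ring
      · have h0 : J - i = 0 := by omega
        have h0' : J + 1 - i = 0 := by omega
        rw [h0, h0', (Finset.sum_Ico_succ_top (by omega) _).symm]
    rw [hsum]

-- B's inner loop computes the same Ico sum
lemma sumB_eq (dp : List Int) (j : Nat) :
    ∀ L, L ≤ j + 1 →
    ((List.range L).map (fun k => dp.getD (j - k) 0)).sum =
      ∑ t ∈ Finset.Ico (j + 1 - L) (j + 1), dp.getD t 0 := by
  intro L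
  induction L with
  | zero => simp
  | succ L ih =>
    intro hL
    rw [List.range_succ, List.map_append, List.sum_append, ih (by omega)]
    have h2 : ∑ t ∈ Finset.Ico (j + 1 - (L + 1)) (j + 1), dp.getD t 0 =
        dp.getD (j - L) 0 + ∑ t ∈ Finset.Ico (j - L + 1) (j + 1), dp.getD t 0 := by
      have : j + 1 - (L + 1) = j - L := by omega
      rw [this]
      exact Finset.sum_eq_sum_Ico_succ_bot (by omega) _
    have h3 : j - L + 1 = j + 1 - L := by omega
    rw [h2, h3]; simp; ring

lemma row_eq (i : Nat) (hi : 1 ≤ i) (dp : List Int) (len : Nat) :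
    rowA i dp len = rowB i dp len := by
  unfold rowA rowB
  rw [foldA_inv]
  refine List.map_congr_left (fun j hj => ?_)
  rw [sumB_eq dp j (min (i - 1) j + 1) (by omega)]
  have : j + 1 - (min (i - 1) j + 1) = j + 1 - i := by omega
  rw [this]

theorem solution_spec_aux (m n : Int) (hn : 0 ≤ n) : solution m n = solution_alt m n := by
  unfold solution solution_alt
  dsimp only
  split_ifs with h
  · rfl
  · have hdp0 : (List.replicate (n + 1).toNat (0 : Int)).set 0 1 =
        1 :: List.replicate n.toNat (0 : Int) := by
      have : (n + 1).toNat = n.toNat + 1 := by omega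
      rw [this, List.replicate_succ, List.set_cons_zero]
    rw [hdp0]
    rw [PySem.List.foldl_congr_mem (List.range' 1 m.toNat)
      (fun dp i => rowA i dp (n + 1).toNat) (fun dp i => rowB i dp (n + 1).toNat)
      (1 :: List.replicate n.toNat 0)
      (fun dp i hi => row_eq i (List.mem_range'_1.mp hi).1 dp _)]

-- ===== VERDICT (by name: the statement is the Claim_ definition above) =====
theorem solution_spec : Claim_equal_solution := by
  intro m n _ hpre
  unfold Spec_solution
  exact solution_spec_aux m n hpre
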